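-- pv_equiv track=rewrite | github.com/liaorunnan/heima | docs/tag_mcp bak.py | _group_labels_by_parent
-- ===== SOURCE A (Python) =====
-- from typing import Any, Dict, List, Optional, Sequence
--
-- def _group_labels_by_parent(labels: List[Dict[str, Any]]) -> Dict[str, List[Dict[str, Any]]]:
--     """按顶级父类分组标签，每个顶级父类及其所有子类为一组
--
--     返回格式: {父类名称: [父类标签, 子类1, 子类2, ...]}
--     """
--     groups: Dict[str, List[Dict[str, Any]]] = {}
--
--     # 第一步：找出所有顶级父类（parent 为 None 的标签）
--     top_level_parents = []
--     for label in labels: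
--         if label.get("parent") is None:
--             parent_name = label.get("name")
--             if parent_name:
--                 top_level_parents.append(parent_name)
--                 # 初始化组，包含父类本身
--                 groups[parent_name] = [label]
--
--     # 第二步：将每个父类的所有子类添加到对应的组
--     for label in labels:
--         parent_name = label.get("parent")
--         if parent_name and parent_name in groups:
--             # 这是某个顶级父类的子类
--             groups[parent_name].append(label)
--
--     return groups
-- ===== SOURCE B (Python) =====
-- from typing import Any, Dict, List
--
--
-- def _group_labels_by_parent(labels: List[Dict[str, Any]]) -> Dict[str, List[Dict[str, Any]]]:
--     """Group labels by top-level parent: {parent name: [parent label, child1, ...]}."""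
--     tops: Dict[str, Any] = {}
--     for label in labels:
--         if label.get("parent") is None and label.get("name"):
--             tops[label["name"]] = label
--     return {name: [top] + [l for l in labels if l.get("parent") == name]
--             for name, top in tops.items()}
-- ===== Notes on version B (the rewrite author's own statement) =====
-- stated objective: simpler
-- what changed: Replaces A's two mutation passes (seed each group with [label], then a second scan appending every child to its group) by one dict of last top-level labels plus a dict comprehension that builds each group with a per-key filter over the labels.
import Mathlib
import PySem

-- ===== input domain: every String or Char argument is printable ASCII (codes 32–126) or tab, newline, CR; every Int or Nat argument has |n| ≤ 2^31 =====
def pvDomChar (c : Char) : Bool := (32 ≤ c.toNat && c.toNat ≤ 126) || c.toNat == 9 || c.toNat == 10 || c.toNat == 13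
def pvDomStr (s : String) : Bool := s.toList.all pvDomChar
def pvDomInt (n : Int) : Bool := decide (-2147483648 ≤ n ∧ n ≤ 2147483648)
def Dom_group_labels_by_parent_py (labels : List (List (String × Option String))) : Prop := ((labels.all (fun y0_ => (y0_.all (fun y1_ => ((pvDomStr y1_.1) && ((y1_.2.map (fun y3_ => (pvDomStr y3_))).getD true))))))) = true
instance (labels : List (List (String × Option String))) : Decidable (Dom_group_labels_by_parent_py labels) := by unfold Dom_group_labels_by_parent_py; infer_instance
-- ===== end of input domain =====

-- B replaces A's two mutation passes (seed groups, then append each child in a second scan) by one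
-- dict of last top-level labels plus a per-group filter comprehension; objective: simpler (not faster).

-- shared primitive: Python's label.get(k) on a label dict (first match; missing key and a stored None both give none)
def pvGet (l : List (String × Option String)) (k : String) : Option String :=
  ((PySem.Dict.mk l).get? k).join

-- ===== PORT A =====
-- first loop of A: builds (top_level_parents, groups seeded with [label])
def pvStepA1 (st : List String × PySem.Dict String (List (List (String × Option String))))
    (label : List (String × Option String)) :
    List String × PySem.Dict String (List (List (String × Option String))) :=
  match pvGet label "parent" with
  | none =>
    match pvGet label "name" with
    | some n => if n ≠ "" then (st.1 ++ [n], st.2.insert n [label]) else st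
    | none => st
  | some _ => st

-- second loop of A: appends each child label to its parent's group
def pvStepA2 (g : PySem.Dict String (List (List (String × Option String))))
    (label : List (String × Option String)) :
    PySem.Dict String (List (List (String × Option String))) :=
  match pvGet label "parent" with
  | some p => if p ≠ "" ∧ g.contains p = true then g.modify p [] (fun v => v ++ [label]) else g
  | none => g

def group_labels_by_parent_py (labels : List (List (String × Option String))) :
    List (String × List (List (String × Option String))) :=
  let st := labels.foldl pvStepA1 ([], PySem.Dict.empty)
  let groups := labels.foldl pvStepA2 st.2
  groups.items

-- ===== PORT B =====
-- B's single loop: last top-level label per name, first-occurrence key order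
def pvStepB (tops : PySem.Dict String (List (String × Option String)))
    (label : List (String × Option String)) :
    PySem.Dict String (List (String × Option String)) :=
  match pvGet label "parent" with
  | none =>
    match pvGet label "name" with
    | some n => if n ≠ "" then tops.insert n label else tops
    | none => tops
  | some _ => tops

def group_labels_by_parent_py_alt (labels : List (List (String × Option String))) :
    List (String × List (List (String × Option String))) :=
  let tops := labels.foldl pvStepB PySem.Dict.empty
  -- dict comprehension over tops (distinct keys, in order) = ordered map over its items
  tops.items.map (fun q => (q.1, q.2 :: labels.filter (fun l => pvGet l "parent" == some q.1)))

-- ===== PRECONDITION & SPEC =====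
def Spec_group_labels_by_parent_py (labels : List (List (String × Option String))) (out : List (String × List (List (String × Option String)))) : Prop := out = group_labels_by_parent_py_alt labels
instance (labels : List (List (String × Option String))) (out : List (String × List (List (String × Option String)))) : Decidable (Spec_group_labels_by_parent_py labels out) := by unfold Spec_group_labels_by_parent_py; infer_instance

-- ===== CLAIM (what is proved, stated in full; the proofs are below) =====
def Claim_equal_group_labels_by_parent_py : Prop := ∀ (labels : List (List (String × Option String))), Dom_group_labels_by_parent_py labels → Spec_group_labels_by_parent_py labels (group_labels_by_parent_py labels)

-- ===== LEMMAS AND PROOFS =====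

-- B's fold keeps keys nodup and nonempty
theorem pvB_keys (xs : List (List (String × Option String)))
    (d : PySem.Dict String (List (String × Option String)))
    (hnd : d.keys.Nodup) (hne : ∀ k ∈ d.keys, k ≠ "") :
    (xs.foldl pvStepB d).keys.Nodup ∧ ∀ k ∈ (xs.foldl pvStepB d).keys, k ≠ "" := by
  induction xs generalizing d with
  | nil => exact ⟨hnd, hne⟩
  | cons y ys ih =>
    simp only [List.foldl_cons]
    cases hp : pvGet y "parent" with
    | some p => rw [show pvStepB d y = d by simp [pvStepB, hp]]; exact ih d hnd hne
    | none =>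
      cases hn : pvGet y "name" with
      | none => rw [show pvStepB d y = d by simp [pvStepB, hp, hn]]; exact ih d hnd hne
      | some n =>
        by_cases h0 : n = ""
        · rw [show pvStepB d y = d by simp [pvStepB, hp, hn, h0]]; exact ih d hnd hne
        · rw [show pvStepB d y = d.insert n y by simp [pvStepB, hp, hn, h0]]
          refine ih _ (PySem.Dict.nodup_keys_insert d n y hnd) ?_
          intro k hk
          rcases (PySem.Dict.mem_keys_insert d n k y).mp hk with rfl | hk
          · exact h0
          · exact hne k hk

-- A's first loop mirrors B's loop: same keys, values wrapped in a singleton list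
theorem pvA1_rel (xs : List (List (String × Option String)))
    (s : List String × PySem.Dict String (List (List (String × Option String))))
    (d : PySem.Dict String (List (String × Option String)))
    (h : s.2.items = d.items.map (fun q => (q.1, [q.2]))) :
    (xs.foldl pvStepA1 s).2.items =
      ((xs.foldl pvStepB d).items).map (fun q => (q.1, [q.2])) := by
  induction xs generalizing s d with
  | nil => exact h
  | cons y ys ih =>
    simp only [List.foldl_cons]
    cases hp : pvGet y "parent" with
    | some p =>
      rw [show pvStepA1 s y = s by simp [pvStepA1, hp],
        show pvStepB d y = d by simp [pvStepB, hp]]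
      exact ih s d h
    | none =>
      cases hn : pvGet y "name" with
      | none =>
        rw [show pvStepA1 s y = s by simp [pvStepA1, hp, hn],
          show pvStepB d y = d by simp [pvStepB, hp, hn]]
        exact ih s d h
      | some n =>
        by_cases h0 : n = ""
        · rw [show pvStepA1 s y = s by simp [pvStepA1, hp, hn, h0],
            show pvStepB d y = d by simp [pvStepB, hp, hn, h0]]
          exact ih s d h
        · rw [show pvStepA1 s y = (s.1 ++ [n], s.2.insert n [y]) by simp [pvStepA1, hp, hn, h0],
            show pvStepB d y = d.insert n y by simp [pvStepB, hp, hn, h0]]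
          apply ih
          have hkeys : s.2.keys = d.keys := by
            simp only [PySem.Dict.keys, h, List.map_map]
            rfl
          have hcont : s.2.contains n = d.contains n := by
            simp only [PySem.Dict.contains_eq_decide_mem_keys, hkeys]
          by_cases hc : d.contains n = true
          · rw [PySem.Dict.items_insert_of_contains _ _ (hcont.trans hc),
              PySem.Dict.items_insert_of_contains _ _ hc, h, List.map_map, List.map_map]
            apply List.map_congr_left
            intro q _
            by_cases hq : q.1 == n
            · simp [Function.comp, hq]
            · simp [Function.comp, hq]
          · have hc' : d.contains n = false := by simp_all
            rw [PySem.Dict.items_insert_of_not_contains _ _ (hcont.trans hc'),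
              PySem.Dict.items_insert_of_not_contains _ _ hc', h, List.map_append]
            rfl

-- A's second loop appends, to each existing (nonempty-named) group, exactly the labels whose parent equals that key
theorem pvA2_char (ys : List (List (String × Option String)))
    (g : PySem.Dict String (List (List (String × Option String))))
    (hnd : g.keys.Nodup) (hne : ∀ k ∈ g.keys, k ≠ "") :
    (ys.foldl pvStepA2 g).items =
      g.items.map (fun q => (q.1, q.2 ++ ys.filter (fun l => pvGet l "parent" == some q.1))) := by
  induction ys generalizing g with
  | nil => simp
  | cons y ys ih =>
    simp only [List.foldl_cons]
    cases hp : pvGet y "parent" with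
    | none =>
      rw [show pvStepA2 g y = g by simp [pvStepA2, hp], ih g hnd hne]
      apply List.map_congr_left
      intro q _
      simp [hp]
    | some p =>
      by_cases h0 : p = ""
      · rw [show pvStepA2 g y = g by simp [pvStepA2, hp, h0], ih g hnd hne]
        apply List.map_congr_left
        intro q hq
        have hk : q.1 ∈ g.keys := by
          simp only [PySem.Dict.keys]
          exact List.mem_map_of_mem hq
        have hcnd : (pvGet y "parent" == some q.1) = false := by
          subst h0
          simp [hp]
          exact fun h => hne q.1 hk h
        simp [hcnd]
      · by_cases hc : g.contains p = true
        · rw [show pvStepA2 g y = g.insert p (g.getD p [] ++ [y]) by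
            simp [pvStepA2, PySem.Dict.modify, hp, h0, hc]]
          have hkeys : (g.insert p (g.getD p [] ++ [y])).keys = g.keys :=
            PySem.Dict.keys_insert_of_contains _ _ hc
          rw [ih _ (hkeys ▸ hnd) (by rw [hkeys]; exact hne),
            PySem.Dict.items_insert_of_contains _ _ hc, List.map_map]
          apply List.map_congr_left
          intro q hq
          by_cases hqp : q.1 = p
          · have hmem : (q.1, q.2) ∈ g.items := hq
            have hget : g.getD q.1 [] = q.2 :=
              PySem.Dict.getD_of_mem_items g hmem hnd []
            subst hqp
            simp [Function.comp, hp, hget, List.append_assoc]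
          · have hne' : (q.1 == p) = false := by simp [hqp]
            simp [Function.comp, hne', hp, Ne.symm hqp]
        · rw [show pvStepA2 g y = g by simp [pvStepA2, hp, hc], ih g hnd hne]
          apply List.map_congr_left
          intro q hq
          have hk : q.1 ∈ g.keys := by
            simp only [PySem.Dict.keys]
            exact List.mem_map_of_mem hq
          have hqp : q.1 ≠ p := by
            intro h; subst h
            exact absurd ((PySem.Dict.contains_iff_mem_keys g q.1).mpr hk) (by simp [hc])
          simp [hp, Ne.symm hqp]

-- ===== VERDICT (by name: the statement is the Claim_ definition above) =====
theorem group_labels_by_parent_py_spec : Claim_equal_group_labels_by_parent_py := by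
  intro labels _
  unfold Spec_group_labels_by_parent_py group_labels_by_parent_py group_labels_by_parent_py_alt
  have hB := pvB_keys labels PySem.Dict.empty (by simp) (by simp)
  have hrel := pvA1_rel labels ([], PySem.Dict.empty) PySem.Dict.empty rfl
  set d := labels.foldl pvStepB PySem.Dict.empty with hd
  set s := labels.foldl pvStepA1 ([], PySem.Dict.empty) with hs
  have hkeys : s.2.keys = d.keys := by
    simp only [PySem.Dict.keys, hrel, List.map_map]
    rfl
  rw [pvA2_char labels s.2 (hkeys ▸ hB.1) (by rw [hkeys]; exact hB.2), hrel, List.map_map]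
  apply List.map_congr_left
  intro q _
  simp [Function.comp]
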